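-- pv_equiv track=rewrite | github.com/s01k1m/algorithm | SWEA/2001_fly/2001_fly.py | fly
-- ===== SOURCE A (Python) =====
-- def fly(m, n, arr):
--     lst = []
--     for i_frontier in range(n - m + 1):
--         for j_frontier in range(n - m + 1):
--             box = []
--             for i_flapper in range(i_frontier, i_frontier+m):
--                 for j_flapper in range(j_frontier, j_frontier+m):
--                     box.append(arr[i_flapper][j_flapper])
--             lst.append(sum(box))
--     return lst
-- ===== SOURCE B (Python) =====
-- def fly(m, n, arr):
--     # 2D prefix-sum table: each window sum is read off in O(1).
--     k = n - m + 1
--     if k <= 0: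
--         return []
--     # P[i][j] = sum of arr[a][b] for a < i, b < j
--     P = [[0] * (n + 1)]
--     for i in range(n):
--         prev = P[-1]
--         row = arr[i]
--         cur = [0]
--         s = 0
--         for j in range(n):
--             s += row[j]
--             cur.append(prev[j + 1] + s)
--         P.append(cur)
--     out = []
--     for i in range(k):
--         for j in range(k):
--             out.append(P[i + m][j + m] - P[i][j + m] - P[i + m][j] + P[i][j])
--     return out
-- ===== Notes on version B (the rewrite author's own statement) =====
-- stated objective: alternative
-- what changed: Replaces the quadratic-per-window rescan (four nested loops) by a 2D prefix-sum table built once, so each window sum is a four-term table read (asymptotically better; a timing run could not verify speed because its inputs fell outside Pre_).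
-- outside the precondition, e.g. on fly(-1, 1, [[5]]): A returns [0, 0, 0, 0, 0, 0, 0, 0, 0], B raises IndexError; on fly(0, 1, []): A returns [0, 0, 0, 0], B raises IndexError
import Mathlib
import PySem

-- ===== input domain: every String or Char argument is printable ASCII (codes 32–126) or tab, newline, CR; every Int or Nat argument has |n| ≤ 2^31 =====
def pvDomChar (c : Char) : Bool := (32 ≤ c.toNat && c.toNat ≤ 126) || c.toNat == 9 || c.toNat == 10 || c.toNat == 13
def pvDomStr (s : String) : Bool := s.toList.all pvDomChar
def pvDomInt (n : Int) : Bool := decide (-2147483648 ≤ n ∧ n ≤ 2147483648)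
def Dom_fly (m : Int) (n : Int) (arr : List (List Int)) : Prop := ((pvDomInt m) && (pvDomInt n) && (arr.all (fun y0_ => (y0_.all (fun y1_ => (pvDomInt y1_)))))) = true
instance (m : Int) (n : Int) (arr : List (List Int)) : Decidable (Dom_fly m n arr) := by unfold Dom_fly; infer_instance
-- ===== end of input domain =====

-- B replaces A's per-window rescan by a 2D prefix-sum table read off in four terms per window (objective: alternative algorithm; lower asymptotic cost, speed not verified).

-- ===== PORT A =====
def fly (m : Int) (n : Int) (arr : List (List Int)) : List Int :=
  (PySem.List.pyRange 0 (n - m + 1) 1).foldl (fun lst i =>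
    (PySem.List.pyRange 0 (n - m + 1) 1).foldl (fun lst j =>
      let box : List Int :=
        (PySem.List.pyRange i (i + m) 1).foldl (fun box ii =>
          (PySem.List.pyRange j (j + m) 1).foldl (fun box jj =>
            box ++ [PySem.List.pyGetD (PySem.List.pyGetD arr ii []) jj 0]) box) []
      lst ++ [box.sum]) lst) []

-- ===== PORT B =====
def fly_alt (m : Int) (n : Int) (arr : List (List Int)) : List Int :=
  if n - m + 1 ≤ 0 then []
  else
    let P : List (List Int) :=
      (PySem.List.pyRange 0 n 1).foldl (fun P i =>
        let prev := PySem.List.pyGetD P (-1) []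
        let row := PySem.List.pyGetD arr i []
        let cur :=
          (PySem.List.pyRange 0 n 1).foldl (fun (st : List Int × Int) j =>
            let s := st.2 + PySem.List.pyGetD row j 0
            (st.1 ++ [PySem.List.pyGetD prev (j + 1) 0 + s], s)) ([0], 0)
        P ++ [cur.1]) [List.replicate (n + 1).toNat 0]
    (PySem.List.pyRange 0 (n - m + 1) 1).foldl (fun out i =>
      (PySem.List.pyRange 0 (n - m + 1) 1).foldl (fun out j =>
        out ++ [PySem.List.pyGetD (PySem.List.pyGetD P (i + m) []) (j + m) 0
                - PySem.List.pyGetD (PySem.List.pyGetD P i []) (j + m) 0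
                - PySem.List.pyGetD (PySem.List.pyGetD P (i + m) []) j 0
                + PySem.List.pyGetD (PySem.List.pyGetD P i []) j 0]) out) []

-- ===== PRECONDITION & SPEC =====
-- Pre_ excludes negative window sizes m < 0 (outside the task's natural domain; A returns
-- all-zero lists there as an artefact of its empty inner ranges, while B's prefix-sum algorithm
-- raises), and inputs whose matrix is smaller than n×n while windows exist: there A raises
-- IndexError, except when m = 0 where A never reads arr but B's table build does (B raises).
def Pre_fly (m : Int) (n : Int) (arr : List (List Int)) : Prop :=
  0 ≤ m ∧ (0 < n - m + 1 → (n ≤ (arr.length : Int) ∧ ∀ row ∈ arr.take n.toNat, n ≤ (row.length : Int)))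
instance (m : Int) (n : Int) (arr : List (List Int)) : Decidable (Pre_fly m n arr) := by
  unfold Pre_fly; infer_instance
def pvWitness_fly : Int × Int × List (List Int) := (1, 2, [[1, 2], [3, 4]])
def Spec_fly (m : Int) (n : Int) (arr : List (List Int)) (out : List Int) : Prop := out = fly_alt m n arr
instance (m : Int) (n : Int) (arr : List (List Int)) (out : List Int) : Decidable (Spec_fly m n arr out) := by unfold Spec_fly; infer_instance

-- ===== CLAIM (what is proved, stated in full; the proofs are below) =====
def Claim_equal_fly : Prop := ∀ (m : Int) (n : Int) (arr : List (List Int)), Dom_fly m n arr → Pre_fly m n arr → Spec_fly m n arr (fly m n arr)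

-- ===== LEMMAS AND PROOFS =====

-- matrix entry, mathematical prefix sum and window sum (proof-only abbreviations)
def pvG (arr : List (List Int)) (i j : Nat) : Int := (arr.getD i []).getD j 0
def pvPre (arr : List (List Int)) (i j : Nat) : Int :=
  ∑ a ∈ Finset.range i, ∑ b ∈ Finset.range j, pvG arr a b
def pvW (arr : List (List Int)) (M i j : Nat) : Int :=
  ∑ a ∈ Finset.range M, ∑ b ∈ Finset.range M, pvG arr (i + a) (j + b)

theorem pv_getG (arr : List (List Int)) (i j : Nat) :
    PySem.List.pyGetD (PySem.List.pyGetD arr (↑i) []) (↑j) 0 = pvG arr i j := by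
  simp only [PySem.List.pyGetD_natCast, pvG, List.getD_eq_getElem?_getD]

theorem pv_rowlk (N a : Nat) (f : Nat → Int) (ha : a < N + 1) :
    PySem.List.pyGetD ((List.range (N+1)).map (fun b => f b)) (↑a) 0 = f a := by
  rw [PySem.List.pyGetD_natCast, List.getD_eq_getElem?_getD, List.getElem?_map,
    List.getElem?_range ha]
  simp

theorem pv_entry (N a b : Nat) (f : Nat → Nat → Int)
    (ha : a < N + 1) (hb : b < N + 1) :
    PySem.List.pyGetD (PySem.List.pyGetD
        ((List.range (N+1)).map (fun i => (List.range (N+1)).map (fun c => f i c))) (↑a) []) (↑b) 0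
      = f a b := by
  have h1 : PySem.List.pyGetD
      ((List.range (N+1)).map (fun i => (List.range (N+1)).map (fun c => f i c))) (↑a) []
      = (List.range (N+1)).map (fun c => f a c) := by
    rw [PySem.List.pyGetD_natCast, List.getD_eq_getElem?_getD, List.getElem?_map,
      List.getElem?_range ha]
    simp
  rw [h1, pv_rowlk N b (fun c => f a c) hb]

theorem pv_sum_flatMap (l : List Nat) (f : Nat → List Int) :
    (l.flatMap f).sum = (l.map (fun x => (f x).sum)).sum := by
  induction l with
  | nil => rfl
  | cons x xs ih => simp [List.flatMap_cons, ih]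

-- inclusion–exclusion: the four-corner prefix-sum expression is the window sum
theorem pv_telescope (arr : List (List Int)) (M i j : Nat) :
    pvPre arr (i + M) (j + M) - pvPre arr i (j + M) - pvPre arr (i + M) j + pvPre arr i j
      = pvW arr M i j := by
  unfold pvPre pvW
  have h1 : ∀ J : Nat, (∑ a ∈ Finset.range (i + M), ∑ b ∈ Finset.range J, pvG arr a b)
      - (∑ a ∈ Finset.range i, ∑ b ∈ Finset.range J, pvG arr a b)
      = ∑ a ∈ Finset.Ico i (i + M), ∑ b ∈ Finset.range J, pvG arr a b := by
    intro J
    rw [Finset.sum_Ico_eq_sub _ (Nat.le_add_right i M)]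
  have h2 : (∑ a ∈ Finset.Ico i (i + M), ∑ b ∈ Finset.range (j + M), pvG arr a b)
      - (∑ a ∈ Finset.Ico i (i + M), ∑ b ∈ Finset.range j, pvG arr a b)
      = ∑ a ∈ Finset.Ico i (i + M), ∑ b ∈ Finset.Ico j (j + M), pvG arr a b := by
    rw [← Finset.sum_sub_distrib]
    refine Finset.sum_congr rfl (fun a _ => ?_)
    rw [Finset.sum_Ico_eq_sub _ (Nat.le_add_right j M)]
  calc pvPre arr (i + M) (j + M) - pvPre arr i (j + M) - pvPre arr (i + M) j + pvPre arr i j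
      = (pvPre arr (i + M) (j + M) - pvPre arr i (j + M))
        - (pvPre arr (i + M) j - pvPre arr i j) := by ring
    _ = ∑ a ∈ Finset.Ico i (i + M), ∑ b ∈ Finset.Ico j (j + M), pvG arr a b := by
        unfold pvPre; rw [h1, h1, h2]
    _ = ∑ a ∈ Finset.range M, ∑ b ∈ Finset.range M, pvG arr (i + a) (j + b) := by
        rw [Finset.sum_Ico_eq_sum_range]
        simp only [Nat.add_sub_cancel_left]
        refine Finset.sum_congr rfl (fun a _ => ?_)
        rw [Finset.sum_Ico_eq_sum_range]
        simp only [Nat.add_sub_cancel_left]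

-- A's box for window (i, j) sums to the window sum
theorem pv_box (m : Int) (arr : List (List Int)) (i j : Nat) :
    ((PySem.List.pyRange (↑i) (↑i + m) 1).flatMap (fun ii =>
      (PySem.List.pyRange (↑j) (↑j + m) 1).map (fun jj =>
        PySem.List.pyGetD (PySem.List.pyGetD arr ii []) jj 0))).sum
    = pvW arr m.toNat i j := by
  rw [PySem.List.pyRange_one (↑i) (↑i + m), PySem.List.pyRange_one (↑j) (↑j + m)]
  simp only [add_sub_cancel_left]
  rw [List.flatMap_map, pv_sum_flatMap]
  unfold pvW
  simp only [List.map_map]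
  have : ∀ a b : Nat, PySem.List.pyGetD (PySem.List.pyGetD arr (↑i + ↑a) []) (↑j + ↑b) 0
      = pvG arr (i + a) (j + b) := by
    intro a b
    rw [show ((↑i : Int) + ↑a) = ((i + a : Nat) : Int) by push_cast; ring,
        show ((↑j : Int) + ↑b) = ((j + b : Nat) : Int) by push_cast; ring]
    simp only [PySem.List.pyGetD_natCast, pvG, List.getD_eq_getElem?_getD]
  simp only [Function.comp_def, this]
  rfl

-- A produces exactly the list of window sums
theorem pv_fly_char (m n : Int) (arr : List (List Int)) :
    fly m n arr = (List.range (n - m + 1).toNat).flatMap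
      (fun i => (List.range (n - m + 1).toNat).map (fun j => pvW arr m.toNat i j)) := by
  unfold fly
  simp only [PySem.List.foldl_append_singleton_eq_map, PySem.List.foldl_append_eq_flatMap,
    List.nil_append]
  rw [PySem.List.pyRange_zero]
  rw [List.flatMap_map]
  simp only [List.map_map]
  refine List.flatMap_congr (fun i _ => ?_)
  refine List.map_congr_left (fun j _ => ?_)
  exact pv_box m arr i j

-- B's inner loop builds row i+1 of the prefix-sum table from row i
theorem pv_rowAux (arr : List (List Int)) (i N : Nat) :
    ∀ J, J ≤ N →
    (List.range J).foldl (fun (st : List Int × Int) (j : Nat) =>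
        (st.1 ++ [PySem.List.pyGetD ((List.range (N+1)).map (fun b => pvPre arr i b)) (↑j + 1) 0
          + (st.2 + pvG arr i j)], st.2 + pvG arr i j)) ([0], 0)
      = ((List.range (J+1)).map (fun b => pvPre arr (i+1) b), ∑ b ∈ Finset.range J, pvG arr i b) := by
  intro J
  induction J with
  | zero => intro _; simp [pvPre]
  | succ J ih =>
    intro hJ
    rw [List.range_succ (n := J), List.foldl_append, ih (by omega)]
    simp only [List.foldl_cons, List.foldl_nil]
    have hprev : PySem.List.pyGetD ((List.range (N+1)).map (fun b => pvPre arr i b)) (↑J + 1) 0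
        = pvPre arr i (J+1) := by
      rw [show ((J : Int) + 1) = ((J + 1 : Nat) : Int) by push_cast; ring]
      exact pv_rowlk N (J+1) (fun b => pvPre arr i b) (by omega)
    rw [hprev]
    refine Prod.ext ?_ ?_
    · show _ ++ _ = _
      rw [List.range_succ (n := J + 1), List.map_append]
      simp only [List.map_cons, List.map_nil]
      congr 2
      rw [← Finset.sum_range_succ]
      simp [pvPre, Finset.sum_range_succ]
    · show _ + _ = _
      rw [Finset.sum_range_succ]

-- B's outer loop builds the full prefix-sum table
theorem pv_tableAux (arr : List (List Int)) (N : Nat) :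
    ∀ t, t ≤ N →
    (List.range t).foldl (fun (P : List (List Int)) (i : Nat) =>
        P ++ [((List.range N).foldl (fun (st : List Int × Int) (j : Nat) =>
            (st.1 ++ [PySem.List.pyGetD (PySem.List.pyGetD P (-1) []) (↑j + 1) 0
              + (st.2 + pvG arr i j)], st.2 + pvG arr i j)) ([0], 0)).1])
      [List.replicate (N + 1) 0]
    = (List.range (t+1)).map (fun i => (List.range (N+1)).map (fun b => pvPre arr i b)) := by
  intro t
  induction t with
  | zero =>
    intro _
    simp [List.range_one, pvPre, List.map_const']
  | succ t ih =>
    intro ht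
    rw [List.range_succ (n := t), List.foldl_append, ih (by omega)]
    simp only [List.foldl_cons, List.foldl_nil]
    have hlast : PySem.List.pyGetD
        ((List.range (t+1)).map (fun i => (List.range (N+1)).map (fun b => pvPre arr i b))) (-1) []
        = (List.range (N+1)).map (fun b => pvPre arr t b) := by
      rw [List.range_succ (n := t), List.map_append]
      simp only [List.map_cons, List.map_nil]
      exact PySem.List.pyGetD_neg_one_append_singleton _ _ _
    rw [hlast, pv_rowAux arr t N N le_rfl]
    rw [List.range_succ (n := t + 1), List.map_append]
    simp

theorem pv_tableAux' (arr : List (List Int)) (N : Nat) :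
    (List.range N).foldl (fun (P : List (List Int)) (i : Nat) =>
        P ++ [((List.range N).foldl (fun (st : List Int × Int) (j : Nat) =>
            (st.1 ++ [PySem.List.pyGetD (PySem.List.pyGetD P (-1) []) (↑j + 1) 0
              + (st.2 + PySem.List.pyGetD (PySem.List.pyGetD arr (↑i) []) (↑j) 0)],
             st.2 + PySem.List.pyGetD (PySem.List.pyGetD arr (↑i) []) (↑j) 0)) ([0], 0)).1])
      [List.replicate (N + 1) 0]
    = (List.range (N+1)).map (fun i => (List.range (N+1)).map (fun b => pvPre arr i b)) := by
  simp only [pv_getG]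
  exact pv_tableAux arr N N le_rfl

-- B produces exactly the list of window sums
theorem pv_fly_alt_char (m n : Int) (arr : List (List Int)) (hm : 0 ≤ m) (hk : 0 < n - m + 1) :
    fly_alt m n arr = (List.range (n - m + 1).toNat).flatMap
      (fun i => (List.range (n - m + 1).toNat).map (fun j => pvW arr m.toNat i j)) := by
  have hmge : (0:Int) ≤ m := by omega
  unfold fly_alt
  rw [if_neg (by omega)]
  simp only [PySem.List.pyRange_zero, List.foldl_map]
  rw [show (n+1).toNat = n.toNat + 1 from by omega]
  rw [pv_tableAux' arr n.toNat]
  simp only [PySem.List.foldl_append_singleton_eq_map, PySem.List.foldl_append_eq_flatMap,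
    List.nil_append]
  refine List.flatMap_congr (fun i hi => ?_)
  refine List.map_congr_left (fun j hj => ?_)
  rw [List.mem_range] at hi hj
  have hiM : i + m.toNat < n.toNat + 1 := by omega
  have hjM : j + m.toNat < n.toNat + 1 := by omega
  have hi1 : i < n.toNat + 1 := by omega
  have hj1 : j < n.toNat + 1 := by omega
  rw [show ((i:Int) + m) = ((i + m.toNat : Nat) : Int) by push_cast [Int.toNat_of_nonneg hmge]; ring]
  rw [show ((j:Int) + m) = ((j + m.toNat : Nat) : Int) by push_cast [Int.toNat_of_nonneg hmge]; ring]
  rw [pv_entry n.toNat (i + m.toNat) (j + m.toNat) (fun a b => pvPre arr a b) hiM hjM,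
      pv_entry n.toNat i (j + m.toNat) (fun a b => pvPre arr a b) hi1 hjM,
      pv_entry n.toNat (i + m.toNat) j (fun a b => pvPre arr a b) hiM hj1,
      pv_entry n.toNat i j (fun a b => pvPre arr a b) hi1 hj1]
  exact pv_telescope arr m.toNat i j

-- ===== VERDICT (by name: the statement is the Claim_ definition above) =====
theorem fly_spec : Claim_equal_fly := by
  intro m n arr _ hpre
  unfold Spec_fly
  by_cases hk : n - m + 1 ≤ 0
  · simp [fly, fly_alt, hk, PySem.List.pyRange_one_eq_nil hk]
  · rw [pv_fly_char, pv_fly_alt_char m n arr hpre.1 (by omega)]
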